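-- pv_equiv track=rewrite | github.com/7venminutes/Blog | database/db_helpers/db_helper.py | select_root_node
-- ===== SOURCE A (Python) =====
-- def select_root_node(path_list):
--     """
--     Desc1: 将每条路径看作以该路径为根节点的一棵树，用含最少路径的集合A去替换path_list，
--     同时保证按照A与path_list中的路径生成的森林是等效的，用列表的形式返回集合A；
--     Desc2: 找出path_list中存在包含关系的路径，将被包含的路径从列表中剔除掉，返回新列表
--     :param path_list: 待筛选的路径列表
--     :return: 筛选之后的路径列表
--     """
--     result = []
--     while len(path_list) > 0:
--         min_length = 0
--         min_length_index = 0
--         i = 0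
--         # 选出目前列表中最短的路径，其肯定不被任何其他路径所包含，将之作为基准看是否包含其他路径
--         for path in path_list:
--             if not str(path).endswith('/'):
--                 path += '/'
--             length = len(str(path))
--             if length < min_length:
--                 min_length = length
--                 min_length_index = i
--             i += 1
--         new_root_path = str(path_list.pop(min_length_index))
--         result.append(new_root_path)
--         # 倒序遍历path_list,避免在循环体内删除path_list数据时出错
--         for i in range(len(path_list) - 1, -1, -1):
--             # new_root_path包含path_list[i]
--             if path_list[i].find(new_root_path) == 0:
--                 path_list.pop(i)
--                 # path_list已删除，下面的代码中不能再使用path_list[i],否则可能会数组越界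
--             # 此处不能将else的情况加入result中，因为不确定该路径是否与path_list中剩余其他路径存在包含关系
--         # 继续while循环
--     return result
-- ===== SOURCE B (Python) =====
-- def select_root_node(path_list):
--     # One forward pass with a hash set of kept roots: a path is dropped iff some
--     # already-kept root is one of its prefixes (checked by hashing each prefix).
--     # Note: A empties the caller's path_list in place; B does not mutate it --
--     # the equivalence is about the return value.
--     result = []
--     kept = set()
--     for path in path_list:
--         if not any(path[:k] in kept for k in range(len(path) + 1)):
--             result.append(path)
--             kept.add(path)
--     return result
-- ===== Notes on version B (the rewrite author's own statement) =====
-- stated objective: faster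
-- what changed: Replaced A's repeated pop-first-then-rescan-and-delete passes over a mutated list by a single forward pass that keeps a hash set of kept roots and drops a path iff one of its own prefixes is in that set.
import Mathlib
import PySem

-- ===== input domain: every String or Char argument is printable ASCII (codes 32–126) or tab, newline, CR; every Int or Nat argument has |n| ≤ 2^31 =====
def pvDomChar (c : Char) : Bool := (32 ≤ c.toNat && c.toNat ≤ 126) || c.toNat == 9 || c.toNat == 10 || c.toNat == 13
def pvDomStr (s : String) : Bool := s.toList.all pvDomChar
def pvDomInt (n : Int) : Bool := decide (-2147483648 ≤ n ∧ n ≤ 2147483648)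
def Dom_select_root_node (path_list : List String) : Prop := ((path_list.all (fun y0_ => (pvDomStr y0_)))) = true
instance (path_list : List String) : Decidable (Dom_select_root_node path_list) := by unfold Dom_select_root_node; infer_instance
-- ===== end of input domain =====

-- B replaces A's repeated pop-first-then-rescan-and-delete passes (A's "shortest path" scan never
-- moves its index, so A always pops the front) by a single forward pass that keeps a set of kept
-- roots and drops a path iff one of its prefixes is in that set; A empties the caller's list in
-- place, B does not mutate — the equivalence proved is about the return value.


-- ===== PORT A =====
-- body of A's inner reverse-index loop: 'if path_list[i].find(new_root) == 0: path_list.pop(i)'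
-- (the 'none' branches are unreachable: every visited index is in range)
def pvInnerStep (root : String) (l : List String) (i : Int) : List String :=
  match PySem.List.pyGet? l i with
  | none => l
  | some p =>
    if PySem.Str.find p root == 0 then
      match PySem.List.pop? l i with
      | none => l
      | some r => r.2
    else l

-- 'for i in range(len(path_list) - 1, -1, -1): …'
def pvInnerLoop (root : String) (pl : List String) : List String :=
  (PySem.List.pyRange ((pl.length : Int) - 1) (-1) (-1)).foldl (pvInnerStep root) pl

-- needed only for the termination proof of pvWhile (cited in its decreasing_by)
theorem pvInnerStep_length_le (root : String) (l : List String) (i : Int) :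
    (pvInnerStep root l i).length ≤ l.length := by
  unfold pvInnerStep
  match h : PySem.List.pyGet? l i with
  | none => simp
  | some p =>
    simp only
    split
    · match hp : PySem.List.pop? l i with
      | none => simp
      | some r =>
        have := PySem.List.length_of_pop?_eq_some l hp
        simp; omega
    · simp

theorem pvInnerLoop_length_le (root : String) (pl : List String) :
    (pvInnerLoop root pl).length ≤ pl.length := by
  unfold pvInnerLoop
  generalize PySem.List.pyRange ((pl.length : Int) - 1) (-1) (-1) = is
  induction is generalizing pl with
  | nil => simp
  | cons i is ih =>
    simp only [List.foldl_cons]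
    exact le_trans (ih (pvInnerStep root pl i)) (pvInnerStep_length_le root pl i)

-- the 'while len(path_list) > 0' loop of A ('result' is the accumulator)
def pvWhile (pl : List String) (result : List String) : List String :=
  if 0 < pl.length then
    -- the shortest-path scan: min_length starts at 0, so 'length < min_length' never fires
    let m := pl.foldl (fun (s : Int × Int × Int) path =>
      let path2 := if PySem.Str.endswith path "/" then path else path ++ "/"
      let length : Int := PySem.Str.len path2
      if length < s.1 then (length, s.2.2, s.2.2 + 1) else (s.1, s.2.1, s.2.2 + 1)) (0, 0, 0)
    match hp : PySem.List.pop? pl m.2.1 with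
    | none => result      -- unreachable: the popped index is in range
    | some r => pvWhile (pvInnerLoop r.1 r.2) (result ++ [r.1])
  else result
termination_by pl.length
decreasing_by
  have h1 := PySem.List.length_of_pop?_eq_some pl hp
  have h2 := pvInnerLoop_length_le r.1 r.2
  omega

def select_root_node (path_list : List String) : List String :=
  pvWhile path_list []

-- ===== PORT B =====
-- one forward pass: drop a path iff one of its prefixes path[:k] is an already-kept root
def select_root_node_alt (path_list : List String) : List String :=
  (path_list.foldl (fun (st : List String × PySem.Set String) path =>
    if (PySem.List.pyRange 0 (PySem.Str.len path + 1) 1).any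
        (fun k => PySem.Set.contains st.2 (PySem.Str.slice path none (some k))) then st
    else (st.1 ++ [path], PySem.Set.add st.2 path)) ([], PySem.Set.empty)).1

-- ===== PRECONDITION & SPEC =====
def Spec_select_root_node (path_list : List String) (out : List String) : Prop := out = select_root_node_alt path_list
instance (path_list : List String) (out : List String) : Decidable (Spec_select_root_node path_list out) := by unfold Spec_select_root_node; infer_instance

-- ===== CLAIM (what is proved, stated in full; the proofs are below) =====
def Claim_equal_select_root_node : Prop := ∀ (path_list : List String), Dom_select_root_node path_list → Spec_select_root_node path_list (select_root_node path_list)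

-- ===== LEMMAS AND PROOFS =====

-- common reference function: keep the head, drop its prefix-extensions, recurse
def pvSpecList : List String → List String
  | [] => []
  | x :: xs => x :: pvSpecList (xs.filter (fun p => !decide (x.toList <+: p.toList)))
termination_by l => l.length
decreasing_by
  simp only [List.length_cons, List.length_unattach]
  exact Nat.lt_succ_of_le (le_trans (List.length_filter_le _ _) (by simp))

-- 'p.find(root) == 0' says exactly 'root is a prefix of p'
theorem pvFind_eq_zero_iff (p root : String) :
    (PySem.Str.find p root == 0) = true ↔ root.toList <+: p.toList := by
  rw [beq_iff_eq, PySem.Str.find_eq]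
  constructor
  · intro h
    have := (PySem.Chars.find_spec (s := p.toList) (sub := root.toList) (by rw [h])).1
    simpa [h] using this
  · intro h
    have h0 : 0 ≤ PySem.Chars.find p.toList root.toList :=
      (PySem.Chars.find_nonneg_iff _ _).2 h.isInfix
    have hs := PySem.Chars.find_spec h0
    by_contra hne
    have hpos : 0 < (PySem.Chars.find p.toList root.toList).toNat := by omega
    exact hs.2 0 hpos (by simpa using h)

theorem pvEraseIdx_append (zs t : List String) (y : String) :
    (zs ++ y :: t).eraseIdx zs.length = zs ++ t := by
  induction zs with
  | nil => simp
  | cons a as ih => simpa using ih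

-- A's reverse-index delete loop, generalized over an untouched tail t
theorem pvInner_gen (root : String) (ys : List String) : ∀ (t : List String),
    (PySem.List.pyRange ((ys.length : Int) - 1) (-1) (-1)).foldl (pvInnerStep root) (ys ++ t)
    = ys.filter (fun p => !decide (root.toList <+: p.toList)) ++ t := by
  induction ys using List.reverseRecOn with
  | nil =>
    intro t
    rw [PySem.List.pyRange_neg_one_eq_nil (by simp)]
    simp
  | append_singleton zs y ih =>
    intro t
    have hlen : (((zs ++ [y]).length : Int)) - 1 = (zs.length : Int) := by simp
    rw [hlen, PySem.List.pyRange_neg_one_cons (by omega), List.foldl_cons]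
    have hstep : pvInnerStep root (zs ++ [y] ++ t) (zs.length : Int)
        = if PySem.Str.find y root == 0 then zs ++ t else zs ++ y :: t := by
      rw [show zs ++ [y] ++ t = zs ++ y :: t by simp]
      unfold pvInnerStep
      rw [PySem.List.pyGet?_append_length]
      dsimp only
      by_cases hf : (PySem.Str.find y root == 0) = true
      · rw [if_pos hf, if_pos hf, PySem.List.pop?_natCast _ _ (by simp)]
        dsimp only
        exact pvEraseIdx_append zs t y
      · rw [if_neg hf, if_neg hf]
    rw [hstep]
    by_cases hf : (PySem.Str.find y root == 0) = true
    · rw [if_pos hf, ih t, List.filter_append, List.filter_singleton]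
      have hy : (!decide (root.toList <+: y.toList)) = false := by
        simp [(pvFind_eq_zero_iff y root).1 hf]
      rw [hy]; simp
    · rw [if_neg hf, ih (y :: t), List.filter_append, List.filter_singleton]
      have hy : (!decide (root.toList <+: y.toList)) = true := by
        simp only [Bool.not_eq_true', decide_eq_false_iff_not]
        intro h; exact hf ((pvFind_eq_zero_iff y root).2 h)
      rw [hy]; simp

theorem pvInnerLoop_eq_filter (root : String) (pl : List String) :
    pvInnerLoop root pl = pl.filter (fun p => !decide (root.toList <+: p.toList)) := by
  have := pvInner_gen root pl []
  simpa [pvInnerLoop] using this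

-- the shortest-path scan never updates its state: it always reports index 0
theorem pvMin_gen (pl : List String) : ∀ (i : Int),
    (pl.foldl (fun (s : Int × Int × Int) path =>
      let path2 := if PySem.Str.endswith path "/" then path else path ++ "/"
      let length : Int := PySem.Str.len path2
      if length < s.1 then (length, s.2.2, s.2.2 + 1) else (s.1, s.2.1, s.2.2 + 1)) (0, 0, i))
    = (0, 0, i + pl.length) := by
  induction pl with
  | nil => intro i; simp
  | cons x xs ih =>
    intro i
    rw [List.foldl_cons]
    have h0 : ¬ (PySem.Str.len (if PySem.Str.endswith x "/" then x else x ++ "/") < (0:Int)) := by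
      simp [PySem.Str.len_eq]
    dsimp only
    rw [if_neg h0]
    have hih := ih (i+1)
    dsimp only at hih
    rw [hih]
    simp only [List.length_cons, Prod.mk.injEq]
    push_cast
    refine ⟨trivial, trivial, ?_⟩
    omega

theorem pvWhile_eq_spec_aux : ∀ (n : Nat) (pl : List String), pl.length ≤ n →
    ∀ res, pvWhile pl res = res ++ pvSpecList pl := by
  intro n
  induction n with
  | zero =>
    intro pl hl res
    have : pl = [] := List.eq_nil_of_length_eq_zero (Nat.le_zero.1 hl)
    subst this
    rw [pvWhile]
    simp [pvSpecList]
  | succ n ih =>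
    intro pl hl res
    match pl with
    | [] => rw [pvWhile]; simp [pvSpecList]
    | x :: xs =>
      rw [pvWhile]
      rw [if_pos (by simp)]
      have hm := pvMin_gen (x :: xs) 0
      dsimp only at hm ⊢
      rw [hm]
      dsimp only
      rw [PySem.List.pop?_zero_cons]
      dsimp only
      rw [pvInnerLoop_eq_filter]
      rw [ih _ (le_trans (List.length_filter_le _ _) (by simpa using hl))]
      rw [show pvSpecList (x :: xs) = x :: pvSpecList (xs.filter (fun p => !decide (x.toList <+: p.toList))) from by rw [pvSpecList]]
      simp

theorem pvWhile_eq_spec (pl res : List String) : pvWhile pl res = res ++ pvSpecList pl :=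
  pvWhile_eq_spec_aux pl.length pl le_rfl res

-- B's prefix test: some slice path[:k] is a kept root ↔ some kept root is a prefix of p
theorem pvAnyPrefix_iff (kept : PySem.Set String) (p : String) :
    ((PySem.List.pyRange 0 (PySem.Str.len p + 1) 1).any
      (fun k => PySem.Set.contains kept (PySem.Str.slice p none (some k))) = true)
    ↔ ∃ q ∈ kept, q.toList <+: p.toList := by
  rw [List.any_eq_true]
  constructor
  · rintro ⟨k, hk, hc⟩
    rw [PySem.List.mem_pyRange_one] at hk
    refine ⟨PySem.Str.slice p none (some k), (PySem.Set.contains_iff _ _).1 hc, ?_⟩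
    rw [PySem.Str.toList_slice, PySem.Chars.slice_eq_listSlice,
      PySem.List.slice_to p.toList hk.1]
    exact List.take_prefix _ _
  · rintro ⟨q, hq, hpre⟩
    refine ⟨(q.toList.length : Int), ?_, ?_⟩
    · rw [PySem.List.mem_pyRange_one]
      have := hpre.length_le
      rw [PySem.Str.len_eq]
      omega
    · rw [PySem.Set.contains_iff]
      have hts : (PySem.Str.slice p none (some (q.toList.length : Int))).toList = q.toList := by
        rw [PySem.Str.toList_slice, PySem.Chars.slice_eq_listSlice,
          PySem.List.slice_to_natCast p.toList q.toList.length]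
        exact (List.prefix_iff_eq_take.1 hpre).symm
      rwa [String.toList_inj.1 hts]

theorem pvAddPrefix_iff (kept : PySem.Set String) (x p : String) :
    (∃ q ∈ PySem.Set.add kept x, q.toList <+: p.toList)
    ↔ ((∃ q ∈ kept, q.toList <+: p.toList) ∨ x.toList <+: p.toList) := by
  constructor
  · rintro ⟨q, hq, hp⟩
    rcases (PySem.Set.mem_add kept x q).1 hq with h | h
    · exact Or.inl ⟨q, h, hp⟩
    · subst h; exact Or.inr hp
  · rintro (⟨q, h, hp⟩ | hp)
    · exact ⟨q, (PySem.Set.mem_add kept x q).2 (Or.inl h), hp⟩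
    · exact ⟨x, (PySem.Set.mem_add kept x x).2 (Or.inr rfl), hp⟩

-- B's fold computes pvSpecList of the paths with no kept prefix
theorem pvAlt_fold_eq_spec : ∀ (pl res : List String) (kept : PySem.Set String),
    (pl.foldl (fun (st : List String × PySem.Set String) path =>
      if (PySem.List.pyRange 0 (PySem.Str.len path + 1) 1).any
          (fun k => PySem.Set.contains st.2 (PySem.Str.slice path none (some k))) then st
      else (st.1 ++ [path], PySem.Set.add st.2 path)) (res, kept)).1
    = res ++ pvSpecList (pl.filter (fun p => !decide (∃ q ∈ kept, q.toList <+: p.toList))) := by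
  intro pl
  induction pl with
  | nil => intro res kept; simp [pvSpecList]
  | cons x xs ih =>
    intro res kept
    rw [List.foldl_cons]
    by_cases hc : (∃ q ∈ kept, q.toList <+: x.toList)
    · rw [if_pos ((pvAnyPrefix_iff kept x).2 hc)]
      rw [List.filter_cons_of_neg (by simpa using hc)]
      exact ih res kept
    · rw [if_neg (fun h => hc ((pvAnyPrefix_iff kept x).1 h))]
      rw [List.filter_cons_of_pos (by simpa using hc)]
      rw [show pvSpecList (x :: xs.filter (fun p => !decide (∃ q ∈ kept, q.toList <+: p.toList)))
          = x :: pvSpecList ((xs.filter (fun p => !decide (∃ q ∈ kept, q.toList <+: p.toList))).filter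
              (fun p => !decide (x.toList <+: p.toList))) from by rw [pvSpecList]]
      rw [ih (res ++ [x]) (PySem.Set.add kept x)]
      rw [List.filter_filter]
      have hpred : ∀ p : String,
          (!decide (∃ q ∈ PySem.Set.add kept x, q.toList <+: p.toList))
          = ((!decide (x.toList <+: p.toList)) && !decide (∃ q ∈ kept, q.toList <+: p.toList)) := by
        intro p
        rw [decide_eq_decide.2 (pvAddPrefix_iff kept x p)]
        rw [Bool.decide_or, Bool.not_or, Bool.and_comm]
      simp only [hpred]
      simp

-- ===== VERDICT (by name: the statement is the Claim_ definition above) =====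
theorem select_root_node_spec : Claim_equal_select_root_node := by
  intro pl _
  unfold Spec_select_root_node select_root_node select_root_node_alt
  rw [pvWhile_eq_spec, pvAlt_fold_eq_spec]
  simp [PySem.Set.empty]
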